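-- pv_equiv track=rewrite | github.com/manwar/perlweeklychallenge-club | challenge-187/mohammad-anwar/python/ch-2.py | magicalTriplets
-- ===== SOURCE A (Python) =====
-- import itertools
--
-- def magicalTriplets(array):
--     array.sort()
--     magical = {}
--     for triplet in itertools.permutations(array, 3):
--         triplet_list = list(triplet)
--         triplet_list.sort(reverse=True)
--         a = triplet_list[0]
--         b = triplet_list[1]
--         c = triplet_list[2]
--         if (a + b > c) and (b + c > a) and (a + c > b):
--             key = ':'.join([str(i) for i in triplet_list])
--             val = sum(triplet_list)
--             magical[key] = val
--
--     if len(magical) == 0: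
--         return []
--
--     magical_triplet = sorted(magical, key=magical.get, reverse=True)[0]
--     return [int(i) for i in magical_triplet.split(":")]
-- ===== SOURCE B (Python) =====
-- def magicalTriplets(array):
--     # Max-perimeter triangle: sort descending once; the first consecutive triple
--     # (s[i], s[i+1], s[i+2]) with s[i+1] + s[i+2] > s[i] is the answer (any valid
--     # triple at positions p<q<r makes the consecutive triple at p valid, and
--     # consecutive-triple sums are non-increasing, so the first hit has maximal sum).
--     s = sorted(array, reverse=True)
--     for i in range(len(s) - 2):
--         a, b, c = s[i], s[i + 1], s[i + 2]
--         if b + c > a: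
--             return [a, b, c]
--     return []
-- ===== Notes on version B (the rewrite author's own statement) =====
-- stated objective: faster
-- what changed: Replaces the O(n^3) enumeration of all 3-permutations with a dict of string-keyed candidates by a single sort descending plus one linear scan for the first consecutive triple satisfying the triangle inequality, which is provably the maximum-sum valid triplet.
import Mathlib
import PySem

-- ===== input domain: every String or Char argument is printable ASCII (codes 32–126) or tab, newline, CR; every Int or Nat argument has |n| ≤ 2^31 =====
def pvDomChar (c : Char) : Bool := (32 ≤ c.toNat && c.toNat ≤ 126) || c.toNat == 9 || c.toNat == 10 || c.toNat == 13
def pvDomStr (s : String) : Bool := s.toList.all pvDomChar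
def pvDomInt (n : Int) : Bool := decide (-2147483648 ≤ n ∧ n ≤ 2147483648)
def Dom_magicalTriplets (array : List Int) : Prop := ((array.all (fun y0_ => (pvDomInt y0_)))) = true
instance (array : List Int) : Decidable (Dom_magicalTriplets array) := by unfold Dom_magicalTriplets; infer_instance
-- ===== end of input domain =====

-- B replaces A's enumeration of all 3-permutations + dict of candidates by one descending sort
-- and a single scan for the first consecutive triple satisfying the triangle inequality.
-- NOTE: Python A sorts its argument in place (array.sort()); the equivalence proved here is about
-- the RETURN value only.

-- ===== PORT A =====
-- A-side helper: the body of A's 'for triplet in itertools.permutations(array, 3)' loop.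
-- The dict key 'a:b:c' (':'.join(str(i) for i in triplet_list)) is represented by the triple
-- [a, b, c] itself: the string encoding is injective (str(int) contains no ':') and the final
-- split(':')/int() decoding inverts it, so dict insertion order, overwrite and lookup behave
-- exactly as in Python.
def aLoop (magical : PySem.Dict (List Int) Int) (triplet : List Int) : PySem.Dict (List Int) Int :=
  let tl := PySem.List.sorted triplet (fun x => x) true    -- triplet_list.sort(reverse=True)
  let a := PySem.List.pyGetD tl 0 0                        -- triplet_list[0]; always in range
  let b := PySem.List.pyGetD tl 1 0
  let c := PySem.List.pyGetD tl 2 0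
  if a + b > c ∧ b + c > a ∧ a + c > b then
    magical.insert [a, b, c] tl.sum                        -- magical[key] = sum(triplet_list)
  else magical

def magicalTriplets (array : List Int) : List Int :=
  let arr := PySem.List.sorted array (fun x => x) false    -- array.sort()
  let magical := (PySem.List.permutations arr 3).foldl aLoop PySem.Dict.empty
  if magical.size = 0 then []                              -- len(magical) == 0
  else
    -- sorted(magical, key=magical.get, reverse=True)[0]; every compared key is in the dict,
    -- so magical.get k = magical.getD k 0 there.
    let best := PySem.List.pyGetD
      (PySem.List.sorted magical.keys (fun k => magical.getD k 0) true) 0 []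
    -- [int(i) for i in best.split(':')] decodes the represented key back to the triple itself.
    best

-- ===== PORT B =====
-- B-side helper: the scan 'for i in range(len(s) - 2): ... return [a, b, c]' of Source B.
def altGo : List Int → List Int
  | a :: b :: c :: rest => if b + c > a then [a, b, c] else altGo (b :: c :: rest)
  | _ => []

def magicalTriplets_alt (array : List Int) : List Int :=
  altGo (PySem.List.sorted array (fun x => x) true)        -- sorted(array, reverse=True)

-- ===== PRECONDITION & SPEC =====
def Spec_magicalTriplets (array : List Int) (out : List Int) : Prop := out = magicalTriplets_alt array
instance (array : List Int) (out : List Int) : Decidable (Spec_magicalTriplets array out) := by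
  unfold Spec_magicalTriplets; infer_instance

-- ===== CLAIM (what is proved, stated in full; the proofs are below) =====
def Claim_equal_magicalTriplets : Prop :=
  ∀ (array : List Int), Dom_magicalTriplets array → Spec_magicalTriplets array (magicalTriplets array)

-- ===== LEMMAS AND PROOFS =====

-- A's valid candidate keys, phrased against B's descending-sorted list: descending triples
-- [a, b, c] forming a triangle that are sublists of sorted(array, reverse=True).
def KeyProp (array : List Int) (k : List Int) : Prop :=
  ∃ a b c : Int, k = [a, b, c] ∧ b ≤ a ∧ c ≤ b ∧ a < b + c ∧
    k.Sublist (PySem.List.sorted array (fun x => x) true)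

-- the key aLoop inserts for a length-3 triplet, if any
def goodKey (t : List Int) : Option (List Int) :=
  let tl := PySem.List.sorted t (fun x => x) true
  let a := PySem.List.pyGetD tl 0 0
  let b := PySem.List.pyGetD tl 1 0
  let c := PySem.List.pyGetD tl 2 0
  if a + b > c ∧ b + c > a ∧ a + c > b then some [a, b, c] else none

lemma pairwise_getElem_anti {l : List Int} (hp : List.Pairwise (fun a b : Int => b ≤ a) l)
    {i j : Nat} (hij : i ≤ j) (hj : j < l.length) : l[j] ≤ l[i]'(lt_of_le_of_lt hij hj) := by
  rcases Nat.eq_or_lt_of_le hij with h | h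
  · subst h; exact le_refl _
  · exact List.pairwise_iff_getElem.mp hp i j _ hj h

lemma sublist_le {l₁ l₂ : List Int} (h : l₁.Sublist l₂)
    (hp : List.Pairwise (fun a b : Int => b ≤ a) l₂) (i : Nat) (h1 : i < l₁.length)
    (h2 : i < l₂.length) : l₁[i] ≤ l₂[i] := by
  induction h generalizing i with
  | slnil => simp at h1
  | @cons l₁' l₂' a h ih =>
    have h2' : i < l₂'.length := lt_of_lt_of_le h1 h.length_le
    have step : (a :: l₂')[i+1]'(by simpa using Nat.succ_lt_succ h2') ≤ (a :: l₂')[i] :=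
      pairwise_getElem_anti hp (Nat.le_succ i) (by simpa using Nat.succ_lt_succ h2')
    have heq : l₂'[i] = (a :: l₂')[i+1]'(by simpa using Nat.succ_lt_succ h2') := by simp
    calc l₁'[i] ≤ l₂'[i] := ih hp.of_cons i h1 h2'
      _ ≤ (a :: l₂')[i] := heq ▸ step
  | @cons₂ l₁' l₂' a h ih =>
    cases i with
    | zero => simp
    | succ i =>
      simp only [List.getElem_cons_succ]
      exact ih hp.of_cons i (by simpa using h1) (by simpa using h2)

lemma mem_permutations_of_sublist {c xs : List Int} (h : c.Sublist xs) :
    c ∈ PySem.List.permutations xs c.length := by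
  induction c generalizing xs with
  | nil => simp [PySem.List.permutations_zero]
  | cons a c' ih =>
    rcases List.cons_sublist_iff.mp h with ⟨r₁, r₂, hxs, ha, hc'⟩
    rcases List.append_of_mem ha with ⟨p, q, rfl⟩
    have hxs' : xs = p ++ a :: (q ++ r₂) := by simp [hxs]
    subst hxs'
    have hilt : p.length < (p ++ a :: (q ++ r₂)).length := by simp
    have hget : (p ++ a :: (q ++ r₂))[p.length]? = some a := by
      rw [List.getElem?_append_right (le_refl _)]; simp
    have herase : (p ++ a :: (q ++ r₂)).eraseIdx p.length = p ++ (q ++ r₂) := by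
      rw [List.eraseIdx_append_of_length_le (le_refl _)]; simp
    rw [PySem.List.permutations.eq_def]
    simp only [List.length_cons]
    refine List.mem_flatMap.mpr ⟨p.length, List.mem_range.mpr hilt, ?_⟩
    rw [hget, herase]
    exact List.mem_map.mpr ⟨c', ih (hc'.trans (List.sublist_append_right q r₂) |>.trans
      (List.sublist_append_right p (q ++ r₂))), rfl⟩

lemma subperm_of_mem_permutations {t xs : List Int} {r : Nat}
    (h : t ∈ PySem.List.permutations xs r) : t.Subperm xs := by
  obtain ⟨-, rest, hperm⟩ := PySem.List.exists_perm_of_mem_permutations _ _ _ h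
  exact ((List.sublist_append_left t rest).subperm).trans hperm.subperm

lemma three_eq {t : List Int} (hlen : t.length = 3) :
    t = [PySem.List.pyGetD t 0 0, PySem.List.pyGetD t 1 0, PySem.List.pyGetD t 2 0] := by
  rcases t with _ | ⟨a, _ | ⟨b, _ | ⟨c, _ | ⟨d, t⟩⟩⟩⟩
  · simp at hlen
  · simp at hlen
  · simp at hlen
  · simp [pysem]
  · simp at hlen

lemma aLoop_eq (d : PySem.Dict (List Int) Int) (t : List Int) (hlen : t.length = 3) :
    aLoop d t = match goodKey t with
      | some k => d.insert k k.sum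
      | none => d := by
  have h3 : (PySem.List.sorted t (fun x => x) true).length = 3 := by
    rw [PySem.List.length_sorted]; exact hlen
  unfold aLoop goodKey
  dsimp only
  split_ifs with hc
  · have hsum : (PySem.List.sorted t (fun x => x) true).sum =
        ([PySem.List.pyGetD (PySem.List.sorted t (fun x => x) true) 0 0,
          PySem.List.pyGetD (PySem.List.sorted t (fun x => x) true) 1 0,
          PySem.List.pyGetD (PySem.List.sorted t (fun x => x) true) 2 0] : List Int).sum := by
      conv_lhs => rw [three_eq h3]
    rw [hsum]
  · rfl

lemma fold_keys (L : List (List Int)) (hlen : ∀ t ∈ L, t.length = 3)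
    (d : PySem.Dict (List Int) Int) (k : List Int) :
    k ∈ (L.foldl aLoop d).keys ↔ k ∈ d.keys ∨ ∃ t ∈ L, goodKey t = some k := by
  induction L generalizing d with
  | nil => simp
  | cons t L ih =>
    simp only [List.foldl_cons]
    rw [ih (fun u hu => hlen u (List.mem_cons_of_mem _ hu)),
        aLoop_eq d t (hlen t List.mem_cons_self)]
    cases hk : goodKey t with
    | none =>
      constructor
      · rintro (h | ⟨u, hu, hgu⟩)
        · exact Or.inl h
        · exact Or.inr ⟨u, List.mem_cons_of_mem _ hu, hgu⟩
      · rintro (h | ⟨u, hu, hgu⟩)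
        · exact Or.inl h
        · rcases List.mem_cons.mp hu with rfl | hu
          · rw [hk] at hgu; exact absurd hgu (by simp)
          · exact Or.inr ⟨u, hu, hgu⟩
    | some k' =>
      simp only [PySem.Dict.mem_keys_insert]
      constructor
      · rintro (⟨rfl | h⟩ | ⟨u, hu, hgu⟩)
        · exact Or.inr ⟨t, List.mem_cons_self, hk⟩
        · exact Or.inl h
        · exact Or.inr ⟨u, List.mem_cons_of_mem _ hu, hgu⟩
      · rintro (h | ⟨u, hu, hgu⟩)
        · exact Or.inl (Or.inr h)
        · rcases List.mem_cons.mp hu with rfl | hu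
          · rw [hk] at hgu
            exact Or.inl (Or.inl (by injection hgu with h'; exact h'.symm))
          · exact Or.inr ⟨u, hu, hgu⟩

lemma fold_getD (L : List (List Int)) (hlen : ∀ t ∈ L, t.length = 3)
    (d : PySem.Dict (List Int) Int) (hd : ∀ k ∈ d.keys, d.getD k 0 = k.sum) :
    ∀ k ∈ (L.foldl aLoop d).keys, (L.foldl aLoop d).getD k 0 = k.sum := by
  induction L generalizing d with
  | nil => simpa using hd
  | cons t L ih =>
    simp only [List.foldl_cons]
    refine ih (fun u hu => hlen u (List.mem_cons_of_mem _ hu)) _ ?_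
    rw [aLoop_eq d t (hlen t List.mem_cons_self)]
    cases hk : goodKey t with
    | none => exact hd
    | some k' =>
      intro k hkmem
      rw [PySem.Dict.getD_insert]
      rcases PySem.Dict.mem_keys_insert d k' k k'.sum |>.mp hkmem with rfl | h
      · simp
      · split_ifs with he
        · subst he; rfl
        · exact hd k h

lemma key_iff (array k : List Int) :
    (∃ t ∈ PySem.List.permutations (PySem.List.sorted array (fun x => x) false) 3,
        goodKey t = some k) ↔ KeyProp array k := by
  constructor
  · rintro ⟨t, htmem, hgk⟩
    have hlen3 : t.length = 3 := PySem.List.length_of_mem_permutations htmem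
    have h3 : (PySem.List.sorted t (fun x => x) true).length = 3 := by
      rw [PySem.List.length_sorted]; exact hlen3
    unfold goodKey at hgk; dsimp only at hgk
    split_ifs at hgk with hc
    · injection hgk with hk
      subst hk
      have htl := three_eq h3
      have hpw := PySem.List.sorted_pairwise_rev t (fun x => x)
      rw [htl] at hpw
      rcases List.pairwise_cons.mp hpw with ⟨ha, hpw2⟩
      rcases List.pairwise_cons.mp hpw2 with ⟨hb, -⟩
      have hBA := ha _ List.mem_cons_self
      have hCB := hb _ List.mem_cons_self
      have hp1 : ([PySem.List.pyGetD (PySem.List.sorted t (fun x => x) true) 0 0,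
          PySem.List.pyGetD (PySem.List.sorted t (fun x => x) true) 1 0,
          PySem.List.pyGetD (PySem.List.sorted t (fun x => x) true) 2 0] : List Int).Perm t :=
        htl ▸ PySem.List.sorted_perm t (fun x => x) true
      have hsubperm := (hp1.subperm.trans (subperm_of_mem_permutations htmem)).trans
        ((PySem.List.sorted_perm array (fun x => x) false).subperm.trans
          (PySem.List.sorted_perm array (fun x => x) true).symm.subperm)
      have hsub := List.sublist_of_subperm_of_pairwise (r := fun a b : Int => b ≤ a) hsubperm
        (htl ▸ PySem.List.sorted_pairwise_rev t (fun x => x))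
        (PySem.List.sorted_pairwise_rev array (fun x => x))
      exact ⟨_, _, _, rfl, hBA, hCB, hc.2.1, hsub⟩
  · rintro ⟨a, b, c, rfl, h1, h2, hv, hsub⟩
    have htperm : ([c, b, a] : List Int).Perm [a, b, c] := by
      have hrev : ([a, b, c] : List Int).reverse = [c, b, a] := rfl
      exact hrev ▸ List.reverse_perm [a, b, c]
    have hsubperm : ([c, b, a] : List Int).Subperm
        (PySem.List.sorted array (fun x => x) false) :=
      htperm.subperm.trans (hsub.subperm.trans
        ((PySem.List.sorted_perm array (fun x => x) true).subperm.trans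
          (PySem.List.sorted_perm array (fun x => x) false).symm.subperm))
    have htsub : ([c, b, a] : List Int).Sublist
        (PySem.List.sorted array (fun x => x) false) :=
      List.sublist_of_subperm_of_pairwise (r := fun x y : Int => x ≤ y) hsubperm
        (by simp [List.pairwise_cons]; omega)
        (PySem.List.sorted_pairwise array (fun x => x))
    have hlen : ([c, b, a] : List Int).length = 3 := rfl
    have htmem := mem_permutations_of_sublist htsub
    rw [hlen] at htmem
    refine ⟨[c, b, a], htmem, ?_⟩
    have htl : PySem.List.sorted [c, b, a] (fun x => x) true = [a, b, c] := by
      apply List.Perm.eq_of_pairwise' (r := fun x y : Int => y ≤ x)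
      · exact PySem.List.sorted_pairwise_rev _ _
      · simp [List.pairwise_cons]; omega
      · exact (PySem.List.sorted_perm _ _ _).trans htperm
    unfold goodKey; dsimp only
    rw [htl]
    have e0 : PySem.List.pyGetD ([a, b, c] : List Int) 0 0 = a := by simp [pysem]
    have e1 : PySem.List.pyGetD ([a, b, c] : List Int) 1 0 = b := by simp [pysem]
    have e2 : PySem.List.pyGetD ([a, b, c] : List Int) 2 0 = c := by simp [pysem]
    rw [e0, e1, e2, if_pos (by omega : a + b > c ∧ b + c > a ∧ a + c > b)]

lemma valid_step {a b c p q s : Int} {rest : List Int}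
    (hk : [p, q, s].Sublist (a :: b :: c :: rest))
    (hp : List.Pairwise (fun x y : Int => y ≤ x) (a :: b :: c :: rest))
    (hv : p < q + s) (hcond : ¬ b + c > a) : [p, q, s].Sublist (b :: c :: rest) := by
  rcases List.sublist_cons_iff.mp hk with h | ⟨r', heq, hr⟩
  · exact h
  · injection heq with hpa hr'
    subst hpa
    rw [← hr'] at hr
    have hq : q ≤ b := by
      have := sublist_le hr hp.of_cons 0 (by simp) (by simp)
      simpa using this
    have hs : s ≤ c := by
      have := sublist_le hr hp.of_cons 1 (by simp) (by simp)
      simpa using this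
    exact absurd hv (by omega)

lemma altGo_cases (r : List Int) (hp : List.Pairwise (fun a b : Int => b ≤ a) r) :
    altGo r = [] ∨ ∃ x y z : Int, altGo r = [x, y, z] ∧ [x, y, z].Sublist r ∧
      y ≤ x ∧ z ≤ y ∧ x < y + z := by
  induction r using altGo.induct with
  | case1 a b c rest hc =>
    right
    rcases List.pairwise_cons.mp hp with ⟨ha, hp2⟩
    rcases List.pairwise_cons.mp hp2 with ⟨hb, -⟩
    refine ⟨a, b, c, by simp [altGo, hc], ?_, ha _ List.mem_cons_self,
      hb _ List.mem_cons_self, hc⟩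
    exact List.Sublist.cons₂ a (List.Sublist.cons₂ b (List.Sublist.cons₂ c (List.nil_sublist rest)))
  | case2 a b c rest hc ih =>
    rcases ih hp.of_cons with hnil | ⟨x, y, z, hres, hsub, h1, h2, hv⟩
    · left; simp [altGo, hc, hnil]
    · right; exact ⟨x, y, z, by simp [altGo, hc, hres], List.Sublist.cons a hsub, h1, h2, hv⟩
  | case3 t hno =>
    left
    rcases t with _ | ⟨a, _ | ⟨b, _ | ⟨c, rest⟩⟩⟩
    · rfl
    · rfl
    · rfl
    · exact absurd rfl (hno a b c rest)

lemma altGo_nil_no_valid (r : List Int) (hp : List.Pairwise (fun a b : Int => b ≤ a) r)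
    (h : altGo r = []) {p q s : Int} (hk : [p, q, s].Sublist r)
    (hv : p < q + s) : False := by
  induction r using altGo.induct with
  | case1 a b c rest hc => simp [altGo, hc] at h
  | case2 a b c rest hc ih =>
    rw [show altGo (a :: b :: c :: rest) = altGo (b :: c :: rest) by simp [altGo, hc]] at h
    exact ih hp.of_cons h (valid_step hk hp hv hc)
  | case3 t hno =>
    have hlen := hk.length_le
    rcases t with _ | ⟨a, _ | ⟨b, _ | ⟨c, rest⟩⟩⟩
    · simp at hlen
    · simp at hlen
    · simp at hlen
    · exact absurd rfl (hno a b c rest)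

lemma altGo_max (r : List Int) (hp : List.Pairwise (fun a b : Int => b ≤ a) r)
    {x y z p q s : Int} (h : altGo r = [x, y, z]) (hk : [p, q, s].Sublist r)
    (hv : p < q + s) :
    p + q + s ≤ x + y + z ∧ (p + q + s = x + y + z → ([p, q, s] : List Int) = [x, y, z]) := by
  induction r using altGo.induct with
  | case1 a b c rest hc =>
    have hres : altGo (a :: b :: c :: rest) = [a, b, c] := by simp [altGo, hc]
    rw [hres] at h
    injection h with e1 h; injection h with e2 h; injection h with e3 h
    subst e1; subst e2; subst e3
    have hpa : p ≤ a := by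
      have := sublist_le hk hp 0 (by simp) (by simp); simpa using this
    have hqb : q ≤ b := by
      have := sublist_le hk hp 1 (by simp) (by simp); simpa using this
    have hsc : s ≤ c := by
      have := sublist_le hk hp 2 (by simp) (by simp); simpa using this
    refine ⟨by omega, fun he => ?_⟩
    have hpe : p = a ∧ q = b ∧ s = c := by omega
    simp [hpe.1, hpe.2.1, hpe.2.2]
  | case2 a b c rest hc ih =>
    rw [show altGo (a :: b :: c :: rest) = altGo (b :: c :: rest) by simp [altGo, hc]] at h
    exact ih hp.of_cons h (valid_step hk hp hv hc)
  | case3 t hno =>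
    rcases t with _ | ⟨a, _ | ⟨b, _ | ⟨c, rest⟩⟩⟩
    · simp [altGo] at h
    · simp [altGo] at h
    · simp [altGo] at h
    · exact absurd rfl (hno a b c rest)

-- ===== VERDICT (by name: the statement is the Claim_ definition above) =====
theorem magicalTriplets_spec : Claim_equal_magicalTriplets := by
  intro array _
  unfold Spec_magicalTriplets magicalTriplets magicalTriplets_alt
  dsimp only
  set r := PySem.List.sorted array (fun x => x) true with hr
  set M := (PySem.List.permutations (PySem.List.sorted array (fun x => x) false) 3).foldl
    aLoop PySem.Dict.empty with hM
  have hrp : List.Pairwise (fun a b : Int => b ≤ a) r :=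
    PySem.List.sorted_pairwise_rev array (fun x => x)
  have hempty : (PySem.Dict.empty : PySem.Dict (List Int) Int).keys = [] := rfl
  have hlenP : ∀ t ∈ PySem.List.permutations (PySem.List.sorted array (fun x => x) false) 3,
      t.length = 3 := fun t ht => PySem.List.length_of_mem_permutations ht
  have hkeys : ∀ k, k ∈ M.keys ↔ KeyProp array k := by
    intro k
    rw [hM, fold_keys _ hlenP _ k, hempty]
    simp only [List.not_mem_nil, false_or]
    exact key_iff array k
  have hval : ∀ k ∈ M.keys, M.getD k 0 = k.sum := by
    rw [hM]
    exact fold_getD _ hlenP _ (by rw [hempty]; intro k hk; simp at hk)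
  have hszkeys : M.size = M.keys.length := by
    simp [PySem.Dict.size, PySem.Dict.keys]
  rcases altGo_cases r hrp with hnil | ⟨x, y, z, hres, hsub, h1, h2, hv⟩
  · have hknil : M.keys = [] := by
      rw [List.eq_nil_iff_forall_not_mem]
      intro k hk
      rcases (hkeys k).mp hk with ⟨a, b, c, rfl, -, -, hvv, hsubl⟩
      exact altGo_nil_no_valid r hrp hnil hsubl hvv
    rw [if_pos (by rw [hszkeys, hknil]; rfl), hnil]
  · have hWmem : [x, y, z] ∈ M.keys := (hkeys _).mpr ⟨x, y, z, rfl, h1, h2, hv, hsub⟩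
    have hne : M.keys ≠ [] := fun h0 => by rw [h0] at hWmem; simp at hWmem
    have hsz : ¬ M.size = 0 := by
      rw [hszkeys]
      simpa [List.length_eq_zero_iff] using hne
    rw [if_neg hsz]
    obtain ⟨m, tl', hst⟩ : ∃ m tl',
        PySem.List.sorted M.keys (fun k => M.getD k 0) true = m :: tl' := by
      cases hC : PySem.List.sorted M.keys (fun k => M.getD k 0) true with
      | nil => exact absurd ((PySem.List.sorted_eq_nil_iff _ _ _).mp hC) hne
      | cons m t => exact ⟨m, t, rfl⟩
    rw [hst, PySem.List.pyGetD_zero_cons]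
    have hmmem : m ∈ M.keys := by
      rw [← PySem.List.mem_sorted M.keys (fun k => M.getD k 0) true, hst]
      exact List.mem_cons_self
    have hmax := PySem.List.key_head_sorted_rev_ge M.keys (fun k => M.getD k 0) hst
    have hW := hmax _ hWmem
    dsimp only at hW
    rw [hval _ hWmem, hval _ hmmem] at hW
    rcases (hkeys m).mp hmmem with ⟨p, q, s, rfl, -, -, hvm, hsubm⟩
    have hb := altGo_max r hrp hres hsubm hvm
    have heq : p + q + s = x + y + z := by
      have h1' := hb.1
      have h2' : x + y + z ≤ p + q + s := by
        simp only [List.sum_cons, List.sum_nil] at hW; omega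
      omega
    rw [hb.2 heq, hres]
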